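-- pv_equiv track=rewrite | github.com/MrBrantCode/unitest_baseline | mut_generate/mist_train_cf/cf_44536/solution.py | modify_sequence_and_identify_uniqueness
-- ===== SOURCE A (Python) =====
-- def modify_sequence_and_identify_uniqueness(s, t):
--     t_set = set(t)
--     s_set = set()
--
--     modified_s = ''.join('*' if c in t_set else c for c in s)
--
--     for c in modified_s:
--         if c != '*':
--             s_set.add(c)
--
--     status = "Unique" if len([c for c in modified_s if c != '*']) == len(s_set) else "Non-unique"
--
--     return modified_s, status
-- ===== SOURCE B (Python) =====
-- def modify_sequence_and_identify_uniqueness(s, t):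
--     forbidden = set(t)
--     modified_s = ''.join('*' if c in forbidden else c for c in s)
--     kept = sorted(c for c in modified_s if c != '*')
--     for i in range(len(kept) - 1):
--         if kept[i] == kept[i + 1]:
--             return modified_s, "Non-unique"
--     return modified_s, "Unique"
-- ===== Notes on version B (the rewrite author's own statement) =====
-- stated objective: alternative
-- what changed: Uniqueness of the kept characters is decided by sorting them and scanning adjacent pairs for an equal neighbour (early exit), instead of A's comparison of the kept count against the size of a set accumulated in a second pass.
import Mathlib
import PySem

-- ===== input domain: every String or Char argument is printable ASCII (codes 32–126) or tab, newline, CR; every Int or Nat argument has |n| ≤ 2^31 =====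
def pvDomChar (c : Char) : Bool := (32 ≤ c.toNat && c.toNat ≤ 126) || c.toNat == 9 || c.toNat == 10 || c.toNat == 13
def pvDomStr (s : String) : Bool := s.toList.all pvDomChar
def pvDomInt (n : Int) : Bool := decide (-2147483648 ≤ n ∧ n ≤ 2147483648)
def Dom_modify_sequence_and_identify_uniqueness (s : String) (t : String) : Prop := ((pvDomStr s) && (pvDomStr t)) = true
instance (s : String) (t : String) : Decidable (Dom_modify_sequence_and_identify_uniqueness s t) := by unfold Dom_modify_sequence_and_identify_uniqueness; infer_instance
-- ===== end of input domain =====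

-- B decides uniqueness of the kept characters by sorting them and scanning adjacent pairs
-- (early exit) instead of A's count-vs-set-size comparison; same cost class, alternative algorithm.

-- ===== PORT A =====
def modify_sequence_and_identify_uniqueness (s : String) (t : String) : String × String :=
  let t_set : PySem.Set Char := PySem.Set.ofList t.toList
  let modified_s : List Char :=
    s.toList.map (fun c => if PySem.Set.contains t_set c then '*' else c)
  let s_set : PySem.Set Char :=
    modified_s.foldl (fun acc c => if c ≠ '*' then PySem.Set.add acc c else acc) PySem.Set.empty
  let status : String :=
    if (modified_s.filter (fun c => c ≠ '*')).length = s_set.length then "Unique" else "Non-unique"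
  (String.ofList modified_s, status)

-- ===== PORT B =====
-- the 'for i in range(len(kept)-1): if kept[i]==kept[i+1]: return … Non-unique' loop
def pvHasAdjDup : List Char → Bool
  | a :: b :: r => a == b || pvHasAdjDup (b :: r)
  | _ => false

def modify_sequence_and_identify_uniqueness_alt (s : String) (t : String) : String × String :=
  let forbidden : PySem.Set Char := PySem.Set.ofList t.toList
  let modified_s : List Char :=
    s.toList.map (fun c => if PySem.Set.contains forbidden c then '*' else c)
  let kept : List Char :=
    PySem.List.sorted (modified_s.filter (fun c => c ≠ '*')) (fun x => x) false
  if pvHasAdjDup kept then (String.ofList modified_s, "Non-unique")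
  else (String.ofList modified_s, "Unique")

-- ===== PRECONDITION & SPEC =====
def Spec_modify_sequence_and_identify_uniqueness (s : String) (t : String) (out : String × String) : Prop := out = modify_sequence_and_identify_uniqueness_alt s t
instance (s : String) (t : String) (out : String × String) : Decidable (Spec_modify_sequence_and_identify_uniqueness s t out) := by unfold Spec_modify_sequence_and_identify_uniqueness; infer_instance

-- ===== CLAIM (what is proved, stated in full; the proofs are below) =====
def Claim_equal_modify_sequence_and_identify_uniqueness : Prop := ∀ (s : String) (t : String), Dom_modify_sequence_and_identify_uniqueness s t → Spec_modify_sequence_and_identify_uniqueness s t (modify_sequence_and_identify_uniqueness s t)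

-- ===== LEMMAS AND PROOFS =====

-- A's guarded foldl-add over a list is set(filter ≠ '*') of it
theorem pv_foldl_add_filter (l : List Char) (acc : List Char) :
    l.foldl (fun acc c => if c ≠ '*' then PySem.Set.add acc c else acc) acc
      = (l.filter (fun c => c ≠ '*')).foldl PySem.Set.add acc := by
  induction l generalizing acc with
  | nil => rfl
  | cons a r ih =>
    simp only [ne_eq, decide_not, ite_not] at ih ⊢
    by_cases h : a = '*' <;> simp [h, ih]

theorem pv_len_ofList_eq_iff (l : List Char) :
    (PySem.Set.ofList l).length = l.length ↔ l.Nodup := by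
  constructor
  · intro h
    induction l with
    | nil => simp
    | cons a r ih =>
      rw [PySem.Set.ofList_cons] at h
      by_cases ha : a ∈ r
      · exfalso
        have hle : (PySem.Set.discard (PySem.Set.ofList r) a).length ≤ r.length := by
          calc (PySem.Set.discard (PySem.Set.ofList r) a).length
              ≤ (PySem.Set.ofList r).length := by
                simp [PySem.Set.discard]
                exact List.length_filter_le _ _
            _ ≤ r.length := PySem.Set.length_ofList_le r
        -- discard removes a, which IS in ofList r, so length strictly drops
        have hmem : a ∈ PySem.Set.ofList r := (PySem.Set.mem_ofList r a).2 ha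
        have hlt : (PySem.Set.discard (PySem.Set.ofList r) a).length < (PySem.Set.ofList r).length := by
          simp only [PySem.Set.discard]
          have := List.length_filter_lt_length_iff_exists (l := PySem.Set.ofList r)
            (p := fun y => y != a)
          · exact (this).2 ⟨a, hmem, by simp⟩
        have : (PySem.Set.discard (PySem.Set.ofList r) a).length < r.length :=
          lt_of_lt_of_le hlt (PySem.Set.length_ofList_le r)
        simp at h
        omega
      · have hd : PySem.Set.discard (PySem.Set.ofList r) a = PySem.Set.ofList r := by
          apply List.filter_eq_self.2
          intro b hb
          have : b ∈ r := (PySem.Set.mem_ofList r b).1 hb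
          simp
          rintro rfl; exact ha this
        rw [hd] at h
        simp at h
        exact List.Nodup.cons ha (ih h)
  · intro h
    rw [PySem.Set.ofList_eq_self_of_nodup l h]

-- on a ≤-sorted list, no equal adjacent pair ↔ no duplicates at all
theorem pv_adj_sorted (m : List Char) (hs : m.Pairwise (· ≤ ·)) :
    pvHasAdjDup m = false ↔ m.Nodup := by
  induction m with
  | nil => simp [pvHasAdjDup]
  | cons a r ih =>
    cases r with
    | nil => simp [pvHasAdjDup]
    | cons b r' =>
      rw [List.pairwise_cons] at hs
      have hab : a ≤ b := hs.1 b (by simp)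
      have hbr : ∀ x ∈ r', b ≤ x := by
        have := hs.2; rw [List.pairwise_cons] at this; exact this.1
      simp only [pvHasAdjDup, Bool.or_eq_false_iff, beq_eq_false_iff_ne, ne_eq,
        List.nodup_cons, List.mem_cons, ih hs.2]
      constructor
      · rintro ⟨hne, hrec⟩
        refine ⟨?_, hrec⟩
        rintro (rfl | hmem)
        · exact hne rfl
        · exact absurd (lt_of_le_of_ne hab hne) (not_lt.2 (hbr a hmem))
      · rintro ⟨hnin, hrec⟩
        exact ⟨fun h => hnin (Or.inl h), hrec⟩

theorem pv_sorted_nodup_iff (l : List Char) :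
    pvHasAdjDup (PySem.List.sorted l (fun x => x) false) = false ↔ l.Nodup := by
  have hperm := PySem.List.sorted_perm (xs := l) (key := fun (x : Char) => x) (rev := false)
  have hs := PySem.List.sorted_pairwise (xs := l) (key := fun (x : Char) => x)
  rw [pv_adj_sorted _ hs]
  exact hperm.nodup_iff

theorem pv_len_filter_unique (l : List Char) :
    ((l.filter (fun c => c ≠ '*')).length
        = (l.foldl (fun acc c => if c ≠ '*' then PySem.Set.add acc c else acc) PySem.Set.empty).length)
      ↔ pvHasAdjDup (PySem.List.sorted (l.filter (fun c => c ≠ '*')) (fun x => x) false) = false := by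
  rw [pv_foldl_add_filter]
  have hfold : List.foldl PySem.Set.add PySem.Set.empty (l.filter (fun c => c ≠ '*'))
      = PySem.Set.ofList (l.filter (fun c => c ≠ '*')) := rfl
  rw [hfold, pv_sorted_nodup_iff]
  exact eq_comm.trans (pv_len_ofList_eq_iff _)

-- ===== VERDICT (by name: the statement is the Claim_ definition above) =====
theorem modify_sequence_and_identify_uniqueness_spec : Claim_equal_modify_sequence_and_identify_uniqueness := by
  intro s t _
  unfold Spec_modify_sequence_and_identify_uniqueness
  unfold modify_sequence_and_identify_uniqueness modify_sequence_and_identify_uniqueness_alt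
  dsimp only
  simp only [ne_eq, decide_not]
  set modified := s.toList.map (fun c => if (PySem.Set.ofList t.toList).contains c = true then '*' else c) with hm
  have hiff := pv_len_filter_unique modified
  simp only [ne_eq, decide_not] at hiff
  by_cases h : pvHasAdjDup (PySem.List.sorted (modified.filter (fun c => !decide (c = '*'))) (fun x => x) false) = true
  · rw [if_pos h, if_neg (by rw [hiff]; simp [h])]
  · rw [if_neg h, if_pos (hiff.2 (by simpa using h))]
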